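-- pv_equiv track=rewrite | github.com/paztronomer/bpm_addmask | bitmask_add_area.py | bit_decompose
-- ===== SOURCE A (Python) =====
-- def bit_decompose(int_x):
--     ''' Function to decompose a number in base-2 numbers. This is performed by
--     two binary operators. Idea from Stackoverflow.
--         x << y
--     Returns x with the bits shifted to the left by y places (and new bits on
--     the right-hand-side are zeros). This is the same as multiplying x by 2**y.
--         x & y
--     Does a "bitwise and". Each bit of the output is 1 if the corresponding bit
--     of x AND of y is 1, otherwise it's 0.
--     Inputs
--     - int_x: integer
--     Returns
--     - list of base-2 values from which adding them, the input integer can be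
--     recovered
--     '''
--     base2 = []
--     i = 1
--     while (i <= int_x):
--         if (i & int_x):
--             base2.append(i)
--         i <<= 1
--     return base2
-- ===== SOURCE B (Python) =====
-- def bit_decompose(int_x):
--     if int_x < 1:
--         return []
--     rest = [2 * b for b in bit_decompose(int_x // 2)]
--     return [1] + rest if int_x % 2 else rest
-- ===== Notes on version B (the rewrite author's own statement) =====
-- stated objective: simpler
-- what changed: Replaced A's while-loop that scans an ascending power-of-two mask with bitwise AND tests by a short recursion on the halved input: the parity decides whether the unit power is emitted, and the rest is the doubled decomposition of the floor-halved input; no bit masks and no explicit loop state.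
import Mathlib
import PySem

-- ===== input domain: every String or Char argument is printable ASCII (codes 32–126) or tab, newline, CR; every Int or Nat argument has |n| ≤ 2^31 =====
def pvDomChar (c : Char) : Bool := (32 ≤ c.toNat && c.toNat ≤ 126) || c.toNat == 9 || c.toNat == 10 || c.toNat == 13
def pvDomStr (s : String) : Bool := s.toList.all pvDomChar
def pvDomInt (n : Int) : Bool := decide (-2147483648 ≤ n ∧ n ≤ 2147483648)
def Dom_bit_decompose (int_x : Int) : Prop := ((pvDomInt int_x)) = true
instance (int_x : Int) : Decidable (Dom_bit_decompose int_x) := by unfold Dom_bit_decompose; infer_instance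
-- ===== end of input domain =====

-- B replaces A's power-of-two scanning loop by recursion on the halved number
-- (parity decides whether 1 is emitted, the rest is the doubled decomposition of int_x // 2): simpler, no bit masks.

-- ===== PORT A =====
-- the while-loop of A; `hi : 1 ≤ i` only makes the loop's termination provable (i starts at 1 and doubles)
def bitLoopA (int_x i : Int) (base2 : List Int) (hi : 1 ≤ i) : List Int :=
  if h : i ≤ int_x then
    bitLoopA int_x (i <<< (1 : Nat)) (if Int.land i int_x ≠ 0 then base2 ++ [i] else base2)
      (by rw [Int.shiftLeft_eq]; nlinarith)
  else base2
termination_by (int_x + 1 - i).toNat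
decreasing_by rw [Int.shiftLeft_eq]; simp only [pow_one]; omega

def bit_decompose (int_x : Int) : List Int :=
  bitLoopA int_x 1 [] (le_refl 1)

-- ===== PORT B =====
def bit_decompose_alt (int_x : Int) : List Int :=
  if int_x < 1 then []
  else
    let rest := (bit_decompose_alt (PySem.Int.floordiv int_x 2)).map (fun b => 2 * b)
    if PySem.Int.mod int_x 2 ≠ 0 then 1 :: rest else rest
termination_by int_x.toNat
decreasing_by rw [PySem.Int.floordiv_eq_ediv_of_pos (by norm_num)]; omega

-- ===== PRECONDITION & SPEC =====
def Spec_bit_decompose (int_x : Int) (out : List Int) : Prop := out = bit_decompose_alt int_x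
instance (int_x : Int) (out : List Int) : Decidable (Spec_bit_decompose int_x out) := by unfold Spec_bit_decompose; infer_instance

-- ===== CLAIM (what is proved, stated in full; the proofs are below) =====
def Claim_equal_bit_decompose : Prop := ∀ (int_x : Int), Dom_bit_decompose int_x → Spec_bit_decompose int_x (bit_decompose int_x)

-- ===== LEMMAS AND PROOFS =====

-- Int.land on casts of naturals is the natural &&&
lemma land_natCast (a b : Nat) : Int.land (a : Int) (b : Int) = ((a &&& b : Nat) : Int) := rfl

-- the proof argument of bitLoopA is irrelevant
lemma bitLoopA_congr (n : Int) {i j : Int} (h : i = j) (hi : 1 ≤ i) (hj : 1 ≤ j) (acc : List Int) :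
    bitLoopA n i acc hi = bitLoopA n j acc hj := by subst h; rfl

-- the Nat-level bit identity behind halving: the and of 2a with m is twice the and of a with m/2
lemma nat_land_double (a m : Nat) : (2 * a) &&& m = 2 * (a &&& (m / 2)) := by
  apply Nat.eq_of_testBit_eq
  intro j
  cases j with
  | zero =>
      simp [Nat.testBit_zero, Nat.mul_mod_right]
  | succ j =>
      simp only [Nat.testBit_land]
      rw [← Nat.testBit_div_two (2 * a) j, ← Nat.testBit_div_two (2 * (a &&& (m / 2))) j]
      rw [Nat.mul_div_cancel_left _ (by norm_num), Nat.mul_div_cancel_left _ (by norm_num)]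
      simp [Nat.testBit_div_two]

lemma land_double (i n : Int) (hi : 0 ≤ i) (hn : 0 ≤ n) :
    Int.land (2 * i) n = 2 * Int.land i (n / 2) := by
  obtain ⟨a, rfl⟩ := Int.eq_ofNat_of_zero_le hi
  obtain ⟨m, rfl⟩ := Int.eq_ofNat_of_zero_le hn
  have h2 : (2 * (a : Int)) = ((2 * a : Nat) : Int) := by push_cast; ring
  have hd : ((m : Int) / 2) = ((m / 2 : Nat) : Int) := by omega
  rw [h2, hd, land_natCast, land_natCast, nat_land_double]
  push_cast; ring

lemma land_one (n : Int) (hn : 0 ≤ n) : Int.land 1 n = n % 2 := by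
  obtain ⟨m, rfl⟩ := Int.eq_ofNat_of_zero_le hn
  have : (1 : Int) = ((1 : Nat) : Int) := rfl
  rw [this, land_natCast, Nat.land_comm, Nat.and_one_is_mod]
  omega

-- the accumulator factors out of the loop
lemma bitLoopA_acc (k : Nat) : ∀ (n i : Int) (hi : 1 ≤ i), (n + 1 - i).toNat ≤ k →
    ∀ (acc : List Int), bitLoopA n i acc hi = acc ++ bitLoopA n i [] hi := by
  induction k with
  | zero =>
      intro n i hi hk acc
      have h : ¬ i ≤ n := by omega
      rw [bitLoopA, bitLoopA]
      simp [h]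
      rw [bitLoopA]
      simp [h]
  | succ k ih =>
      intro n i hi hk acc
      conv_lhs => rw [bitLoopA]
      conv_rhs => rw [bitLoopA]
      by_cases h : i ≤ n
      · simp only [h, dif_pos]
        have hm : (n + 1 - i <<< (1 : Nat)).toNat ≤ k := by
          rw [Int.shiftLeft_eq]; simp only [pow_one]; omega
        rw [ih n _ _ hm, ih n _ _ hm (if Int.land i n ≠ 0 then [] ++ [i] else [])]
        by_cases hc : Int.land i n ≠ 0 <;> simp [hc]
      · simp [h]

-- scanning the even powers of n is scanning the powers of n / 2, doubled
lemma bitLoopA_double (k : Nat) : ∀ (n i : Int) (hi2 : (1:Int) ≤ 2 * i) (hi : 1 ≤ i), 0 ≤ n →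
    (n + 1 - 2 * i).toNat ≤ k →
    bitLoopA n (2 * i) [] hi2 = (bitLoopA (n / 2) i [] hi).map (fun b => 2 * b) := by
  induction k with
  | zero =>
      intro n i hi2 hi hn hk
      have h1 : ¬ 2 * i ≤ n := by omega
      have h2 : ¬ i ≤ n / 2 := by omega
      rw [bitLoopA, bitLoopA]
      simp [h1]
      rw [bitLoopA]
      simp [h2]
  | succ k ih =>
      intro n i hi2 hi hn hk
      conv_lhs => rw [bitLoopA]
      conv_rhs => rw [bitLoopA]
      have hguard : 2 * i ≤ n ↔ i ≤ n / 2 := by omega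
      by_cases h : 2 * i ≤ n
      · simp only [h, hguard.mp h, dif_pos]
        have hcond : Int.land (2 * i) n ≠ 0 ↔ Int.land i (n / 2) ≠ 0 := by
          rw [land_double i n (by omega) hn]
          constructor <;> intro hx <;> intro he <;> apply hx <;> omega
        have e1 : (2 * i) <<< (1 : Nat) = 2 * (2 * i) := by
          rw [Int.shiftLeft_eq]; ring
        have e2 : i <<< (1 : Nat) = 2 * i := by
          rw [Int.shiftLeft_eq]; ring
        rw [bitLoopA_congr n e1, bitLoopA_congr (n / 2) e2]
        · rw [bitLoopA_acc ((n + 1 - 2 * (2 * i)).toNat) n (2 * (2 * i)) (by omega) (le_refl _),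
              bitLoopA_acc ((n / 2 + 1 - 2 * i).toNat) (n / 2) (2 * i) (by omega) (le_refl _)]
          rw [ih n (2 * i) (by omega) (by omega) hn (by omega)]
          by_cases hc : Int.land (2 * i) n ≠ 0
          · simp [hc, hcond.mp hc]
          · have : ¬ Int.land i (n / 2) ≠ 0 := fun hx => hc (hcond.mpr hx)
            simp [hc, this]
        · omega
        · omega
      · have h2 : ¬ i ≤ n / 2 := fun hx => h (hguard.mpr hx)
        simp [h, h2]

-- the main bridge: A's loop started at 1 computes B's recursion
lemma main_bridge (k : Nat) : ∀ (n : Int), n.toNat ≤ k →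
    bitLoopA n 1 [] (le_refl 1) = bit_decompose_alt n := by
  induction k with
  | zero =>
      intro n hk
      rw [bitLoopA, bit_decompose_alt]
      have h : ¬ (1 : Int) ≤ n := by omega
      have h' : n < 1 := by omega
      simp [h, h']
  | succ k ih =>
      intro n hk
      rw [bitLoopA, bit_decompose_alt]
      by_cases h : (1 : Int) ≤ n
      · have hlt : ¬ n < 1 := by omega
        simp only [h, dif_pos, hlt, if_false]
        have e1 : (1 : Int) <<< (1 : Nat) = 2 * 1 := by rw [Int.shiftLeft_eq]; ring
        rw [bitLoopA_congr n e1 _ (by omega)]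
        rw [bitLoopA_acc ((n + 1 - 2 * 1).toNat) n (2 * 1) (by omega) (le_refl _)]
        rw [bitLoopA_double ((n + 1 - 2 * 1).toNat) n 1 (by omega) (le_refl 1) (by omega) (le_refl _)]
        rw [ih (n / 2) (by omega)]
        have hfd : PySem.Int.floordiv n 2 = n / 2 :=
          PySem.Int.floordiv_eq_ediv_of_pos (by norm_num)
        have hmd : PySem.Int.mod n 2 = n % 2 :=
          PySem.Int.mod_eq_emod_of_pos (by norm_num)
        have hc : Int.land 1 n ≠ 0 ↔ PySem.Int.mod n 2 ≠ 0 := by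
          rw [land_one n (by omega), hmd]
        simp only [hfd, hmd]
        by_cases hcc : Int.land 1 n ≠ 0
        · simp [hcc, land_one n (by omega) ▸ hcc]
        · have : ¬ n % 2 ≠ 0 := by
            rw [land_one n (by omega)] at hcc; exact hcc
          simp [hcc, this]
      · have h' : n < 1 := by omega
        simp [h, h']

-- ===== VERDICT (by name: the statement is the Claim_ definition above) =====
theorem bit_decompose_spec : Claim_equal_bit_decompose := by
  intro int_x _
  unfold Spec_bit_decompose bit_decompose
  exact main_bridge int_x.toNat int_x (le_refl _)
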